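-- pv_equiv track=rewrite | github.com/pyfca/pyfca | pyfca/implications.py | A
-- ===== SOURCE A (Python) =====
-- Awidth = lambda n: 2**n
--
-- def A(g,i):
--     """recursively constructs A line for g; i = len(g)-1"""
--     g1 = g&(2**i)
--     if i:
--         n = Awidth(i)
--         An = A(g,i-1)
--         if g1:
--             return An<<n | An
--         else:
--             return int('1'*n,2)<<n | An
--     else:
--         if g1:
--             return int('00',2)
--         else:
--             return int('10',2)
-- ===== SOURCE B (Python) =====
-- def A(g, i):
--     """recursively constructs A line for g; i = len(g)-1
--     (iterative bottom-up rebuild of the same pattern)"""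
--     result = 0 if g & 1 else 2
--     for k in range(1, i + 1):
--         n = 2 ** k
--         if g & n:
--             result = result << n | result
--         else:
--             result = ((1 << n) - 1) << n | result
--     return result
-- ===== Notes on version B (the rewrite author's own statement) =====
-- stated objective: alternative
-- what changed: Replaces the top-down recursion by a bottom-up loop over bit levels that maintains one accumulating integer (base case first, then doubling/padding per level), eliminating the recursive call stack.
import Mathlib
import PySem

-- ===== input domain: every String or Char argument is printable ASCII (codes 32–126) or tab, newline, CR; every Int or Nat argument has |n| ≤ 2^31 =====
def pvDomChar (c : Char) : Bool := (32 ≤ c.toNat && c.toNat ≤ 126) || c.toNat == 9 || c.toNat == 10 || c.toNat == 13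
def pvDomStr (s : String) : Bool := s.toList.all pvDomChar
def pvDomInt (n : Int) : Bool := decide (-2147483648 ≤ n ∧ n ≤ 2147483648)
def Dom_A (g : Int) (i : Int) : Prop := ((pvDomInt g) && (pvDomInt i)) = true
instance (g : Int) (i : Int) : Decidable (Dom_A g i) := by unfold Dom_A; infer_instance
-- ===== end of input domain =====

-- B rebuilds the same pattern bottom-up with one accumulating integer and a loop,
-- instead of A's top-down recursion (objective: alternative decomposition).


-- ===== PORT A =====
-- recursion on the fuel i.toNat (Pre_A guarantees 0 ≤ i, so the fuel is exactly i);
-- int('1'*n, 2) is ported exactly as 2^n - 1 (n ≥ 1), int('00',2)=0, int('10',2)=2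
def Arec (g : Int) : Nat → Int
  | 0 => if PySem.Int.band g 1 ≠ 0 then 0 else 2
  | k + 1 =>
    let n : Nat := 2 ^ (k + 1)
    let An := Arec g k
    if PySem.Int.band g ((2 : Int) ^ (k + 1)) ≠ 0 then
      PySem.Int.bor (An <<< n) An
    else
      PySem.Int.bor (((2 : Int) ^ n - 1) <<< n) An

def A (g : Int) (i : Int) : Int := Arec g i.toNat

-- ===== PORT B =====
-- the loop 'for k in range(1, i+1)' is the fold over List.range i.toNat with k+1 as the level
def A_alt (g : Int) (i : Int) : Int :=
  (List.range i.toNat).foldl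
    (fun r k =>
      let n : Nat := 2 ^ (k + 1)
      if PySem.Int.band g ((2 : Int) ^ (k + 1)) ≠ 0 then
        PySem.Int.bor (r <<< n) r
      else
        PySem.Int.bor (((2 : Int) ^ n - 1) <<< n) r)
    (if PySem.Int.band g 1 = 0 then 2 else 0)

-- ===== PRECONDITION & SPEC =====
-- Pre_A: Python A raises TypeError when i < 0 (g & 2**i with a float mask)
def Pre_A (g : Int) (i : Int) : Prop := 0 ≤ i
instance (g : Int) (i : Int) : Decidable (Pre_A g i) := by unfold Pre_A; infer_instance
def pvWitness_A : Int × Int := (5, 2)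

def Spec_A (g : Int) (i : Int) (out : Int) : Prop := out = A_alt g i
instance (g : Int) (i : Int) (out : Int) : Decidable (Spec_A g i out) := by unfold Spec_A; infer_instance

-- ===== CLAIM (what is proved, stated in full; the proofs are below) =====
def Claim_equal_A : Prop := ∀ (g : Int) (i : Int), Dom_A g i → Pre_A g i → Spec_A g i (A g i)

-- ===== LEMMAS AND PROOFS =====
theorem Arec_eq_fold (g : Int) (m : Nat) :
    Arec g m = (List.range m).foldl
      (fun r k =>
        let n : Nat := 2 ^ (k + 1)
        if PySem.Int.band g ((2 : Int) ^ (k + 1)) ≠ 0 then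
          PySem.Int.bor (r <<< n) r
        else
          PySem.Int.bor (((2 : Int) ^ n - 1) <<< n) r)
      (if PySem.Int.band g 1 = 0 then 2 else 0) := by
  induction m with
  | zero =>
    simp only [List.range_zero, List.foldl_nil, Arec]
    by_cases h : PySem.Int.band g 1 = 0 <;> simp [h]
  | succ k ih =>
    rw [List.range_succ, List.foldl_append, ← ih]
    simp [Arec]

-- ===== VERDICT (by name: the statement is the Claim_ definition above) =====
theorem A_spec : Claim_equal_A := by
  intro g i _ _
  unfold Spec_A A A_alt
  exact Arec_eq_fold g i.toNat
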